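-- pv_equiv track=rewrite | github.com/nicos-files/argentina-capital-router | src/market_data/manual_snapshot.py | normalize_fx_pair
-- ===== SOURCE A (Python) =====
-- def normalize_fx_pair(pair: str) -> str:
--     """Normalize an FX pair label.
--
--     - trim
--     - uppercase
--     - replace ``/``, ``-``, and whitespace with ``_``
--     - collapse repeated underscores
--     - strip leading/trailing underscores
--
--     Examples:
--         ``"usdars mep"`` -> ``"USDARS_MEP"``
--         ``"USD/ARS CCL"`` -> ``"USD_ARS_CCL"``
--         ``" usd-ars  official "`` -> ``"USD_ARS_OFFICIAL"``
--     """
--     if pair is None: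
--         raise ValueError("pair is required")
--     if not isinstance(pair, str):
--         raise TypeError("pair must be a string")
--
--     token = pair.strip().upper()
--     if not token:
--         raise ValueError("pair must not be empty")
--
--     for ch in ("/", "-"):
--         token = token.replace(ch, "_")
--     # collapse any whitespace into underscores
--     parts = [chunk for chunk in token.split() if chunk]
--     token = "_".join(parts) if parts else token
--     # collapse double underscores
--     while "__" in token:
--         token = token.replace("__", "_")
--     return token.strip("_")
-- ===== SOURCE B (Python) =====
-- def normalize_fx_pair(pair: str) -> str:
--     """Normalize an FX pair label in one left-to-right pass."""
--     if pair is None: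
--         raise ValueError("pair is required")
--     if not isinstance(pair, str):
--         raise TypeError("pair must be a string")
--
--     token = pair.strip().upper()
--     if not token:
--         raise ValueError("pair must not be empty")
--
--     out = []
--     pending = False
--     for ch in token:
--         if ch in "/-_" or ch.isspace():
--             pending = True
--         else:
--             if pending and out:
--                 out.append("_")
--             out.append(ch)
--             pending = False
--     return "".join(out)
-- ===== Notes on version B (the rewrite author's own statement) =====
-- stated objective: simpler
-- what changed: A's multi-pass pipeline (two replace passes, whitespace split plus join, a loop that repeatedly collapses doubled separators, and a final strip) is replaced by one left-to-right scan with a pending-separator flag that emits each word character and a single separator between words.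
import Mathlib
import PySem

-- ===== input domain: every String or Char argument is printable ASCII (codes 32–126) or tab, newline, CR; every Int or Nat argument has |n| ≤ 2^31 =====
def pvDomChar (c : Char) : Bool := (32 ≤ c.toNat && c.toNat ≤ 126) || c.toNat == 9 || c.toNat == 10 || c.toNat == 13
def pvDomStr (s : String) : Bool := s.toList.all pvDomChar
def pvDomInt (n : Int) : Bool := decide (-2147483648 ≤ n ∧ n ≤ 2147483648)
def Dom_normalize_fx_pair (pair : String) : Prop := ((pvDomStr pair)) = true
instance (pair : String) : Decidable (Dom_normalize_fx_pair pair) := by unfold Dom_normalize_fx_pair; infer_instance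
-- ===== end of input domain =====

-- B replaces A's multi-pass pipeline (two replaces, split/join, a collapse-while loop, strip)
-- by a single left-to-right scan with a pending-separator flag; return values agree on Pre_.

-- ===== PORT A =====

-- the 'while "__" in token: token = token.replace("__", "_")' loop of A; fuel = current length
-- (each iteration strictly shortens the string, so length is enough fuel)
def pvCollapseA : Nat → String → String
  | 0, t => t
  | fuel + 1, t =>
    if PySem.Str.isIn "__" t then pvCollapseA fuel (PySem.Str.replace t "__" "_")
    else t

def normalize_fx_pair (pair : String) : String :=
  -- token = pair.strip().upper()
  let token0 := PySem.Str.upper (PySem.Str.strip pair)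
  -- for ch in ("/", "-"): token = token.replace(ch, "_")   (two-element tuple, unrolled)
  let token1 := PySem.Str.replace (PySem.Str.replace token0 "/" "_") "-" "_"
  -- parts = [chunk for chunk in token.split() if chunk]
  let parts := (PySem.Str.split₀ token1).filter (fun chunk => !chunk.toList.isEmpty)
  -- token = "_".join(parts) if parts else token
  let token2 := if !parts.isEmpty then PySem.Str.join "_" parts else token1
  -- while "__" in token: token = token.replace("__", "_")
  let token3 := pvCollapseA token2.toList.length token2
  -- return token.strip("_")
  PySem.Str.stripChars token3 "_"

-- ===== PORT B =====

-- the loop body of B: 'ch in "/-_" or ch.isspace()' sets pending; otherwise emit (with '_' glue)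
def pvBStep (st : List Char × Bool) (ch : Char) : List Char × Bool :=
  if ch == '/' || ch == '-' || ch == '_' || PySem.Chars.isspace ch then (st.1, true)
  else ((if st.2 && !st.1.isEmpty then st.1 ++ ['_'] else st.1) ++ [ch], false)

def normalize_fx_pair_alt (pair : String) : String :=
  let token := PySem.Str.upper (PySem.Str.strip pair)
  let st := token.toList.foldl pvBStep ([], false)
  String.ofList st.1

-- ===== PRECONDITION & SPEC =====

-- A raises ValueError when the stripped input is empty; those inputs are excluded.
def Pre_normalize_fx_pair (pair : String) : Prop := PySem.Str.strip pair ≠ ""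
instance (pair : String) : Decidable (Pre_normalize_fx_pair pair) := by
  unfold Pre_normalize_fx_pair; infer_instance

def pvWitness_normalize_fx_pair : String := "USD/ARS"

def Spec_normalize_fx_pair (pair : String) (out : String) : Prop := out = normalize_fx_pair_alt pair
instance (pair : String) (out : String) : Decidable (Spec_normalize_fx_pair pair out) := by
  unfold Spec_normalize_fx_pair; infer_instance

-- ===== CLAIM (what is proved, stated in full; the proofs are below) =====
def Claim_equal_normalize_fx_pair : Prop := ∀ (pair : String), Dom_normalize_fx_pair pair → Pre_normalize_fx_pair pair → Spec_normalize_fx_pair pair (normalize_fx_pair pair)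

-- ===== LEMMAS AND PROOFS =====

-- separator classes: what B treats as separators; what remains after A's '/'/'763'-replacement
def pvSep (c : Char) : Bool := c == '/' || c == '-' || c == '_' || PySem.Chars.isspace c
def pvUSep (c : Char) : Bool := c == '_' || PySem.Chars.isspace c
def pvU (c : Char) : Bool := c == '_'
def pvMapc (c : Char) : Char := if c == '/' || c == '-' then '_' else c

-- maximal runs of non-p characters ("words" w.r.t. separator predicate p)
def pvWords (p : Char → Bool) : List Char → List (List Char)
  | [] => []
  | c :: cs =>
    if p c then pvWords p cs
    else (c :: cs.takeWhile (fun d => !p d)) :: pvWords p (cs.dropWhile (fun d => !p d))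
termination_by l => l.length
decreasing_by
  all_goals have := List.length_dropWhile_le (fun d => !p d) cs
  all_goals simp
  all_goals omega

-- join with single underscores
def pvJ : List (List Char) → List Char
  | [] => []
  | [w] => w
  | w :: ws => w ++ '_' :: pvJ ws

-- one pass of token.replace("__", "_")
def pvR1 : List Char → List Char
  | [] => []
  | [c] => [c]
  | c :: d :: cs => if c == '_' && d == '_' then '_' :: pvR1 cs else c :: pvR1 (d :: cs)

-- collapse every run of underscores to a single underscore
def pvSqueeze : List Char → List Char
  | [] => []
  | [c] => [c]
  | c :: d :: cs => if c == '_' && d == '_' then pvSqueeze (d :: cs) else c :: pvSqueeze (d :: cs)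


def pvRstrip (l : List Char) : List Char := (l.reverse.dropWhile pvU).reverse

def pvHeadSep : List Char → Bool
  | [] => false
  | c :: _ => pvSep c

-- ---- pvWords basics ----

theorem pvWords_nil (p : Char → Bool) : pvWords p [] = [] := by simp [pvWords]

theorem pvWords_cons_sep (p : Char → Bool) (c : Char) (cs : List Char) (h : p c = true) :
    pvWords p (c :: cs) = pvWords p cs := by simp [pvWords, h]

theorem pvWords_cons_word (p : Char → Bool) (c : Char) (cs : List Char) (h : p c = false) :
    pvWords p (c :: cs) =
      (c :: cs.takeWhile (fun d => !p d)) :: pvWords p (cs.dropWhile (fun d => !p d)) := by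
  simp [pvWords, h]

theorem pvWords_ne_nil (p : Char → Bool) (l : List Char) (w : List Char)
    (hw : w ∈ pvWords p l) : w ≠ [] := by
  fun_induction pvWords p l with
  | case1 => simp [pvWords] at hw
  | case2 c cs h ih => exact ih hw
  | case3 c cs h ih =>
    rcases List.mem_cons.mp hw with h1 | h2
    · subst h1; simp
    · exact ih h2

theorem pvWords_eq_nil_iff (p : Char → Bool) (l : List Char) :
    pvWords p l = [] ↔ ∀ c ∈ l, p c = true := by
  fun_induction pvWords p l with
  | case1 => simp
  | case2 c cs h ih => simpa [h] using ih
  | case3 c cs h ih =>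
    constructor
    · intro hh; simp at hh
    · intro hh; exact absurd (hh c (by simp)) (by simpa using h)

theorem pvWords_dropWhile (p : Char → Bool) (l : List Char) :
    pvWords p (l.dropWhile p) = pvWords p l := by
  induction l with
  | nil => rfl
  | cons c cs ih =>
    by_cases h : p c = true
    · rw [List.dropWhile_cons_of_pos h, ih, pvWords_cons_sep p c cs h]
    · rw [List.dropWhile_cons_of_neg h]

theorem pvWords_take (p : Char → Bool) (cs : List Char)
    (h : cs.takeWhile (fun d => !p d) ≠ []) :
    pvWords p cs = cs.takeWhile (fun d => !p d) :: pvWords p (cs.dropWhile (fun d => !p d)) := by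
  cases cs with
  | nil => simp at h
  | cons c cs' =>
    by_cases hc : p c = true
    · simp [List.takeWhile_cons, hc] at h
    · have hc' : p c = false := by simpa using hc
      rw [pvWords_cons_word p c cs' hc']
      simp [List.takeWhile_cons, List.dropWhile_cons, hc']

-- ---- pvJ basics ----

theorem pvJ_cons (w : List Char) (ws : List (List Char)) :
    pvJ (w :: ws) = w ++ (if ws = [] then [] else '_' :: pvJ ws) := by
  cases ws <;> simp [pvJ]

-- ---- split() characterization ----

theorem split0_go_eq (s cur : List Char) (acc : List (List Char)) :
    PySem.Chars.split₀.go s cur acc =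
      acc.reverse ++
        (if cur.isEmpty then pvWords PySem.Chars.isspace s
         else (cur.reverse ++ s.takeWhile (fun d => !PySem.Chars.isspace d)) ::
              pvWords PySem.Chars.isspace (s.dropWhile (fun d => !PySem.Chars.isspace d))) := by
  induction s generalizing cur acc with
  | nil =>
    by_cases hc : cur.isEmpty
    · simp [PySem.Chars.split₀.go, hc, pvWords]
    · simp [PySem.Chars.split₀.go, hc, pvWords]
  | cons c rest ih =>
    by_cases hsp : PySem.Chars.isspace c = true
    · by_cases hc : cur.isEmpty
      · rw [show PySem.Chars.split₀.go (c :: rest) cur acc = PySem.Chars.split₀.go rest [] acc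
            from by simp [PySem.Chars.split₀.go, hsp, hc], ih]
        simp [hc, pvWords_cons_sep _ _ _ hsp]
      · rw [show PySem.Chars.split₀.go (c :: rest) cur acc =
              PySem.Chars.split₀.go rest [] (cur.reverse :: acc)
            from by simp [PySem.Chars.split₀.go, hsp, hc], ih]
        simp [hc, hsp, pvWords_cons_sep _ _ _ hsp]
    · have hsp' : PySem.Chars.isspace c = false := by simpa using hsp
      rw [show PySem.Chars.split₀.go (c :: rest) cur acc =
            PySem.Chars.split₀.go rest (c :: cur) acc
          from by simp [PySem.Chars.split₀.go, hsp], ih]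
      by_cases hc : cur.isEmpty
      · have hcur : cur = [] := by simpa using hc
        subst hcur
        simp [pvWords_cons_word _ _ _ hsp', hsp']
      · simp [hc, hsp']

theorem split0_eq (s : List Char) :
    PySem.Chars.split₀ s = pvWords PySem.Chars.isspace s := by
  have := split0_go_eq s [] []
  simpa [PySem.Chars.split₀] using this

-- ---- replace characterizations ----

theorem replace_go_step (old new : List Char) (fuel : Nat) (c : Char) (t acc : List Char) :
    PySem.Chars.replace.go old new (fuel + 1) (c :: t) acc =
      if old.isPrefixOf (c :: t) then
        PySem.Chars.replace.go old new fuel (List.drop old.length (c :: t)) (new.reverse ++ acc)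
      else PySem.Chars.replace.go old new fuel t (c :: acc) := by
  rw [PySem.Chars.replace.go.eq_def]

theorem replace_go_single (a b : Char) (l : List Char) :
    ∀ (fuel : Nat) (acc : List Char), l.length ≤ fuel →
      PySem.Chars.replace.go [a] [b] fuel l acc =
        acc.reverse ++ l.map (fun c => if c == a then b else c) := by
  induction l with
  | nil =>
    intro fuel acc _
    cases fuel <;> simp [PySem.Chars.replace.go]
  | cons c t ih =>
    intro fuel acc hf
    cases fuel with
    | zero => simp at hf
    | succ fuel =>
      rw [replace_go_step]
      by_cases h : (c == a) = true
      · have ha : a = c := (beq_iff_eq.mp h).symm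
        have hpre : List.isPrefixOf [a] (c :: t) = true := by
          simp [List.isPrefixOf, ha]
        rw [if_pos hpre]
        have hd : List.drop [a].length (c :: t) = t := by simp
        rw [hd, ih fuel _ (by simpa using hf)]
        have hite : (if (c == a) = true then b else c) = b := by rw [if_pos h]
        rw [List.map_cons, hite]
        simp
      · have hne : ¬ a = c := fun hh => h (by simp [hh])
        have hpre : ¬ List.isPrefixOf [a] (c :: t) = true := by
          simp [List.isPrefixOf]
          exact hne
        rw [if_neg hpre]
        rw [ih fuel _ (by simpa using hf)]
        have hite : (if (c == a) = true then b else c) = c := by rw [if_neg h]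
        rw [List.map_cons, hite]
        simp

theorem replace_single (a b : Char) (l : List Char) :
    PySem.Chars.replace l [a] [b] = l.map (fun c => if c == a then b else c) := by
  have := replace_go_single a b l l.length [] le_rfl
  simpa [PySem.Chars.replace] using this

theorem replace_go_uu (l : List Char) :
    ∀ (fuel : Nat) (acc : List Char), l.length ≤ fuel →
      PySem.Chars.replace.go ['_', '_'] ['_'] fuel l acc = acc.reverse ++ pvR1 l := by
  induction l using pvR1.induct with
  | case1 =>
    intro fuel acc _
    cases fuel <;> simp [PySem.Chars.replace.go, pvR1]
  | case2 c =>
    intro fuel acc hf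
    cases fuel with
    | zero => simp at hf
    | succ fuel =>
      rw [replace_go_step]
      rw [if_neg (by simp [List.isPrefixOf])]
      cases fuel <;> simp [PySem.Chars.replace.go, pvR1]
  | case3 c d cs h ih =>
    intro fuel acc hf
    cases fuel with
    | zero => simp at hf
    | succ fuel =>
      rw [replace_go_step]
      have hc : c = '_' := by simp at h; exact h.1
      have hd : d = '_' := by simp at h; exact h.2
      subst hc; subst hd
      rw [if_pos (by simp [List.isPrefixOf])]
      have hdrop : List.drop (['_', '_'] : List Char).length ('_' :: '_' :: cs) = cs := by simp
      rw [hdrop, ih fuel _ (by simp at hf ⊢; omega)]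
      have hr : pvR1 ('_' :: '_' :: cs) = '_' :: pvR1 cs := by
        simp [pvR1]
      rw [hr]
      simp
  | case4 c d cs h ih =>
    intro fuel acc hf
    cases fuel with
    | zero => simp at hf
    | succ fuel =>
      rw [replace_go_step]
      have hpre : ¬ List.isPrefixOf ['_', '_'] (c :: d :: cs) = true := by
        simp [List.isPrefixOf]
        intro h1 h2
        exact absurd (by rw [← h1, ← h2]; simp) h
      rw [if_neg hpre]
      rw [ih fuel _ (by simp at hf ⊢; omega)]
      have hr : pvR1 (c :: d :: cs) = c :: pvR1 (d :: cs) := by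
        rw [pvR1]; rw [if_neg (by simpa using h)]
      rw [hr]
      simp

theorem replace_uu (l : List Char) :
    PySem.Chars.replace l ['_', '_'] ['_'] = pvR1 l := by
  have := replace_go_uu l l.length [] le_rfl
  simpa [PySem.Chars.replace] using this

-- ---- pvR1 / pvSqueeze ----

theorem pvR1_step_pos (c d : Char) (cs : List Char) (h : (c == '_' && d == '_') = true) :
    pvR1 (c :: d :: cs) = '_' :: pvR1 cs := by
  rw [pvR1.eq_def]; simp [h]

theorem pvR1_step_neg (c d : Char) (cs : List Char) (h : ¬ (c == '_' && d == '_') = true) :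
    pvR1 (c :: d :: cs) = c :: pvR1 (d :: cs) := by
  rw [pvR1.eq_def]; simp [h]

theorem pvSqueeze_step_pos (c d : Char) (cs : List Char) (h : (c == '_' && d == '_') = true) :
    pvSqueeze (c :: d :: cs) = pvSqueeze (d :: cs) := by
  rw [pvSqueeze.eq_def]; simp [h]

theorem pvSqueeze_step_neg (c d : Char) (cs : List Char) (h : ¬ (c == '_' && d == '_') = true) :
    pvSqueeze (c :: d :: cs) = c :: pvSqueeze (d :: cs) := by
  rw [pvSqueeze.eq_def]; simp [h]

theorem pvR1_length_le (l : List Char) : (pvR1 l).length ≤ l.length := by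
  fun_induction pvR1 l with
  | case1 => simp [pvR1]
  | case2 c => simp [pvR1]
  | case3 c d cs h ih => simp; omega
  | case4 c d cs h ih => simp at ih ⊢; omega

theorem pvR1_cons_ne (d : Char) (cs : List Char) (hd : (d == '_') = false) :
    ∃ t, pvR1 (d :: cs) = d :: t := by
  cases cs with
  | nil => exact ⟨[], rfl⟩
  | cons e cs' => exact ⟨pvR1 (e :: cs'), pvR1_step_neg d e cs' (by simp [hd])⟩

theorem pvSqueeze_cons_ne (c : Char) (hc : (c == '_') = false) (x : List Char) :
    pvSqueeze (c :: x) = c :: pvSqueeze x := by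
  cases x with
  | nil => simp [pvSqueeze]
  | cons d x' => exact pvSqueeze_step_neg c d x' (by simp [hc])

theorem pvR1_length_lt (l : List Char) (h : ['_', '_'] <:+: l) :
    (pvR1 l).length < l.length := by
  fun_induction pvR1 l with
  | case1 => simp at h
  | case2 c =>
    have := h.length_le
    simp at this
  | case3 c d cs hcd ih =>
    have := pvR1_length_le cs
    simp; omega
  | case4 c d cs hcd ih =>
    have htail : ['_', '_'] <:+: (d :: cs) := by
      rcases (List.infix_cons_iff.mp h) with hp | ht
      · exfalso
        rcases hp with ⟨t, ht⟩
        simp at ht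
        exact hcd (by simp [← ht.1, ← ht.2.1])
      · exact ht
    have := ih htail
    simp at this ⊢; omega

theorem pvSqueeze_no_uu (l : List Char) (h : ¬ ['_', '_'] <:+: l) : pvSqueeze l = l := by
  fun_induction pvSqueeze l with
  | case1 => rfl
  | case2 c => rfl
  | case3 c d cs hcd ih =>
    exfalso
    apply h
    have hc : c = '_' := by simp at hcd; exact hcd.1
    have hd : d = '_' := by simp at hcd; exact hcd.2
    subst hc; subst hd
    exact ⟨[], cs, by simp⟩
  | case4 c d cs hcd ih =>
    rw [ih (fun hh => h (hh.trans (List.suffix_cons c (d :: cs)).isInfix))]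

theorem pvSqueeze_underscore (y : List Char) :
    pvSqueeze ('_' :: y) = '_' :: pvSqueeze (y.dropWhile pvU) := by
  induction y with
  | nil => simp [pvSqueeze]
  | cons d y' ih =>
    by_cases hd : (d == '_') = true
    · have hd' : d = '_' := by simpa using hd
      subst hd'
      rw [pvSqueeze_step_pos '_' '_' y' (by simp), ih]
      rw [List.dropWhile_cons_of_pos (by simp [pvU])]
    · have hd' : (d == '_') = false := by simpa using hd
      rw [pvSqueeze_step_neg '_' d y' (by simp [hd'])]
      rw [List.dropWhile_cons_of_neg (by simp [pvU, hd'])]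

theorem dropWhile_pvR1 (l : List Char) :
    (pvR1 l).dropWhile pvU = pvR1 (l.dropWhile pvU) := by
  fun_induction pvR1 l with
  | case1 => simp [pvR1]
  | case2 c =>
    by_cases hc : (c == '_') = true
    · simp [pvR1, List.dropWhile, pvU, hc]
    · simp [pvR1, List.dropWhile, pvU, hc]
  | case3 c d cs hcd ih =>
    have hc : c = '_' := by simp at hcd; exact hcd.1
    have hd : d = '_' := by simp at hcd; exact hcd.2
    subst hc; subst hd
    rw [List.dropWhile_cons_of_pos (by simp [pvU])]
    rw [List.dropWhile_cons_of_pos (by simp [pvU])]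
    rw [List.dropWhile_cons_of_pos (by simp [pvU])]
    exact ih
  | case4 c d cs hcd ih =>
    by_cases hc : (c == '_') = true
    · have hc' : c = '_' := by simpa using hc
      have hd : (d == '_') = false := by
        rcases Bool.eq_false_or_eq_true (d == '_') with h' | h'
        · exfalso; exact hcd (by simp [hc, h'])
        · exact h'
      subst hc'
      rw [List.dropWhile_cons_of_pos (by simp [pvU])]
      rw [List.dropWhile_cons_of_pos (by simp [pvU])]
      rcases pvR1_cons_ne d cs hd with ⟨t, ht⟩
      rw [ht]
      rw [List.dropWhile_cons_of_neg (by simp [pvU, hd])]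
      rw [List.dropWhile_cons_of_neg (by simp [pvU, hd])]
      rw [← ht]
    · have hc' : (c == '_') = false := by
        rcases Bool.eq_false_or_eq_true (c == '_') with h' | h'
        · exact absurd h' hc
        · exact h'
      rw [List.dropWhile_cons_of_neg (by simp [pvU, hc'])]
      rw [List.dropWhile_cons_of_neg (by simp [pvU, hc'])]
      rw [pvR1_step_neg c d cs hcd]

theorem pvSqueeze_pvR1_aux : ∀ (n : Nat) (l : List Char), l.length ≤ n →
    pvSqueeze (pvR1 l) = pvSqueeze l := by
  intro n
  induction n with
  | zero =>
    intro l h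
    have : l = [] := by cases l <;> simp at h ⊢
    subst this; rfl
  | succ n ih =>
    intro l h
    match l with
    | [] => rfl
    | [c] => rfl
    | c :: d :: cs =>
      by_cases hcd : (c == '_' && d == '_') = true
      · have hc : c = '_' := by simp at hcd; exact hcd.1
        have hd : d = '_' := by simp at hcd; exact hcd.2
        subst hc; subst hd
        rw [pvR1_step_pos _ _ _ (by simp)]
        rw [pvSqueeze_underscore (pvR1 cs), dropWhile_pvR1]
        rw [ih (cs.dropWhile pvU) (by have := List.length_dropWhile_le pvU cs; simp at h; omega)]
        rw [pvSqueeze_step_pos _ _ _ (by simp)]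
        rw [pvSqueeze_underscore cs]
      · rw [pvR1_step_neg c d cs hcd]
        by_cases hc : (c == '_') = true
        · have hc' : c = '_' := by simpa using hc
          have hd : (d == '_') = false := by
            rcases Bool.eq_false_or_eq_true (d == '_') with h' | h'
            · exfalso; exact hcd (by simp [hc, h'])
            · exact h'
          subst hc'
          rcases pvR1_cons_ne d cs hd with ⟨t, ht⟩
          rw [ht]
          rw [pvSqueeze_step_neg _ _ _ (by simp [hd])]
          rw [← ht]
          rw [ih (d :: cs) (by simp at h ⊢; omega)]
          rw [pvSqueeze_step_neg _ _ _ (by simp [hd])]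
        · have hc' : (c == '_') = false := by
            rcases Bool.eq_false_or_eq_true (c == '_') with h' | h'
            · exact absurd h' hc
            · exact h'
          rw [pvSqueeze_cons_ne c hc' (pvR1 (d :: cs))]
          rw [ih (d :: cs) (by simp at h ⊢; omega)]
          rw [pvSqueeze_cons_ne c hc' (d :: cs)]

theorem pvSqueeze_pvR1 (l : List Char) : pvSqueeze (pvR1 l) = pvSqueeze l :=
  pvSqueeze_pvR1_aux l.length l le_rfl

theorem dropWhile_pvSqueeze_aux : ∀ (n : Nat) (z : List Char), z.length ≤ n →
    (pvSqueeze z).dropWhile pvU = pvSqueeze (z.dropWhile pvU) := by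
  intro n
  induction n with
  | zero =>
    intro z h
    have : z = [] := by cases z <;> simp at h ⊢
    subst this; rfl
  | succ n ih =>
    intro z h
    match z with
    | [] => rfl
    | c :: y =>
      by_cases hc : (c == '_') = true
      · have hc' : c = '_' := by simpa using hc
        subst hc'
        rw [pvSqueeze_underscore y]
        rw [List.dropWhile_cons_of_pos (by simp [pvU])]
        rw [List.dropWhile_cons_of_pos (by simp [pvU])]
        rw [ih (y.dropWhile pvU) (by have := List.length_dropWhile_le pvU y; simp at h; omega)]
        rw [List.dropWhile_idempotent]
      · have hc' : (c == '_') = false := by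
          rcases Bool.eq_false_or_eq_true (c == '_') with h' | h'
          · exact absurd h' hc
          · exact h'
        rw [pvSqueeze_cons_ne c hc' y]
        rw [List.dropWhile_cons_of_neg (by simp [pvU, hc'])]
        rw [List.dropWhile_cons_of_neg (by simp [pvU, hc'])]
        rw [pvSqueeze_cons_ne c hc' y]

theorem dropWhile_pvSqueeze (z : List Char) :
    (pvSqueeze z).dropWhile pvU = pvSqueeze (z.dropWhile pvU) := by
  exact dropWhile_pvSqueeze_aux z.length z le_rfl

theorem pvCollapseA_eq (fuel : Nat) (t : String) (h : t.toList.length ≤ fuel) :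
    pvCollapseA fuel t = String.ofList (pvSqueeze t.toList) := by
  induction fuel generalizing t with
  | zero =>
    have hn : t.toList = [] := by
      cases hh : t.toList with
      | nil => rfl
      | cons a l => rw [hh] at h; simp at h
    rw [pvCollapseA, hn]
    rw [show pvSqueeze [] = [] from rfl]
    rw [show t = String.ofList t.toList from (String.ofList_toList).symm, hn]
  | succ fuel ih =>
    rw [pvCollapseA]
    by_cases hin : PySem.Str.isIn "__" t = true
    · rw [if_pos hin]
      have hinf : ['_', '_'] <:+: t.toList := by
        have h0 : PySem.Chars.isIn ("__" : String).toList t.toList = true := by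
          rw [← PySem.Str.isIn_eq]; exact hin
        have h1 : ("__" : String).toList = ['_', '_'] := by decide
        rw [h1] at h0
        exact (PySem.Chars.isIn_iff_infix _ _).mp h0
      have hrep : (PySem.Str.replace t "__" "_").toList = pvR1 t.toList := by
        rw [PySem.Str.toList_replace]
        rw [show ("__" : String).toList = ['_', '_'] from by decide]
        rw [show ("_" : String).toList = ['_'] from by decide]
        exact replace_uu t.toList
      rw [ih _ (by rw [hrep]; have := pvR1_length_lt t.toList hinf; omega)]
      rw [hrep, pvSqueeze_pvR1]
    · rw [if_neg hin]
      have hninf : ¬ ['_', '_'] <:+: t.toList := by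
        intro hinf
        apply hin
        rw [PySem.Str.isIn_eq]
        rw [show ("__" : String).toList = ['_', '_'] from by decide]
        exact (PySem.Chars.isIn_iff_infix _ _).mpr hinf
      rw [pvSqueeze_no_uu _ hninf, String.ofList_toList]

-- ---- strip("_") characterizations ----

theorem pvRstrip_cons (c : Char) (y : List Char) :
    pvRstrip (c :: y) =
      if pvRstrip y = [] then (if c == '_' then [] else [c]) else c :: pvRstrip y := by
  unfold pvRstrip
  rw [List.reverse_cons, List.dropWhile_append]
  by_cases hy : (List.dropWhile pvU y.reverse).isEmpty = true
  · rw [if_pos hy]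
    have hy' : (List.dropWhile pvU y.reverse).reverse = [] := by
      simp at hy ⊢; exact hy
    rw [if_pos hy']
    by_cases hc : (c == '_') = true
    · simp [List.dropWhile, pvU, hc]
    · simp [List.dropWhile, pvU, hc]
  · rw [if_neg hy]
    have hy' : ¬ (List.dropWhile pvU y.reverse).reverse = [] := by
      simp at hy ⊢; exact hy
    rw [if_neg hy']
    simp

theorem stripChars_underscore (l : List Char) :
    PySem.Chars.stripChars l ['_'] = pvRstrip (l.dropWhile pvU) := by
  unfold PySem.Chars.stripChars pvRstrip
  have hp : (fun c => (['_'] : List Char).contains c) = pvU := by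
    funext c
    simp [pvU, List.contains_cons, Bool.beq_eq_decide_eq]
  rw [hp]

theorem pvJ_words_ne_nil (p : Char → Bool) (l : List Char) (h : pvWords p l ≠ []) :
    pvJ (pvWords p l) ≠ [] := by
  cases hw : pvWords p l with
  | nil => exact absurd hw h
  | cons w ws =>
    have hwne : w ≠ [] := pvWords_ne_nil p l w (by rw [hw]; simp)
    rw [pvJ_cons]
    simp [hwne]

theorem takeWhile_nil_of_all (p : Char → Bool) (z : List Char)
    (h : ∀ c ∈ z, p c = true) :
    z.takeWhile (fun d => !p d) = [] := by
  cases z with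
  | nil => rfl
  | cons c z' =>
    rw [List.takeWhile_cons_of_neg]
    simp [h c (by simp)]

theorem pvRstrip_nil : pvRstrip [] = [] := by simp [pvRstrip]

theorem pvRstrip_squeeze_aux : ∀ (n : Nat) (z : List Char), z.length ≤ n →
    pvRstrip (pvSqueeze z) =
      (if z.head? = some '_' ∧ pvWords pvU z ≠ [] then ['_'] else []) ++ pvJ (pvWords pvU z) := by
  intro n
  induction n with
  | zero =>
    intro z h
    have : z = [] := by cases z <;> simp at h ⊢
    subst this
    simp [pvSqueeze, pvRstrip_nil, pvWords_nil, pvJ]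
  | succ n ih =>
    intro z h
    cases z with
    | nil => simp [pvSqueeze, pvRstrip_nil, pvWords_nil, pvJ]
    | cons c z₂ =>
      by_cases hcu : (c == '_') = true
      · have hcu' : c = '_' := by simpa using hcu
        subst hcu'
        have hwz : pvWords pvU ('_' :: z₂) = pvWords pvU z₂ :=
          pvWords_cons_sep _ _ _ (by simp [pvU])
        cases z₂ with
        | nil =>
          rw [show pvSqueeze ['_'] = ['_'] from rfl]
          have : pvRstrip ['_'] = [] := by simp [pvRstrip, List.dropWhile, pvU]
          rw [this, hwz, pvWords_nil]
          simp [pvJ]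
        | cons d z₃ =>
          by_cases hd : (d == '_') = true
          · have hd' : d = '_' := by simpa using hd
            subst hd'
            rw [pvSqueeze_step_pos _ _ _ (by simp)]
            rw [ih ('_' :: z₃) (by simp at h ⊢; omega)]
            rw [hwz, pvWords_cons_sep _ _ _ (by simp [pvU])]
            simp
          · have hd' : (d == '_') = false := by
              rcases Bool.eq_false_or_eq_true (d == '_') with h' | h'
              · exact absurd h' hd
              · exact h'
            rw [pvSqueeze_step_neg _ _ _ (by simp [hd'])]
            rw [pvRstrip_cons]
            rw [ih (d :: z₃) (by simp at h ⊢; omega)]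
            have hwd : pvWords pvU (d :: z₃) =
                (d :: z₃.takeWhile (fun e => !pvU e)) :: pvWords pvU (z₃.dropWhile (fun e => !pvU e)) :=
              pvWords_cons_word _ _ _ (by simp [pvU, hd'])
            have hwdne : pvWords pvU (d :: z₃) ≠ [] := by rw [hwd]; simp
            have hjne : pvJ (pvWords pvU (d :: z₃)) ≠ [] := pvJ_words_ne_nil _ _ hwdne
            rw [if_neg (by
              rw [if_neg (by
                intro hcon
                rcases hcon with ⟨h1, _⟩
                simp at h1
                rw [h1] at hd'
                simp at hd')]
              simpa using hjne)]
            rw [if_neg (by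
              intro hcon
              rcases hcon with ⟨h1, _⟩
              simp at h1
              rw [h1] at hd'
              simp at hd')]
            rw [hwz]
            rw [if_pos ⟨rfl, hwdne⟩]
            rfl
      · have hc' : (c == '_') = false := by
          rcases Bool.eq_false_or_eq_true (c == '_') with h' | h'
          · exact absurd h' hcu
          · exact h'
        rw [pvSqueeze_cons_ne c hc' z₂]
        rw [pvRstrip_cons]
        rw [ih z₂ (by simp at h ⊢; omega)]
        have hwc : pvWords pvU (c :: z₂) =
            (c :: z₂.takeWhile (fun e => !pvU e)) :: pvWords pvU (z₂.dropWhile (fun e => !pvU e)) :=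
          pvWords_cons_word _ _ _ (by simp [pvU, hc'])
        by_cases hW : pvWords pvU z₂ = []
        · have hall : ∀ e ∈ z₂, pvU e = true := (pvWords_eq_nil_iff pvU z₂).mp hW
          have htw : z₂.takeWhile (fun e => !pvU e) = [] := takeWhile_nil_of_all pvU z₂ hall
          have hdw : pvWords pvU (z₂.dropWhile (fun e => !pvU e)) = [] := by
            apply (pvWords_eq_nil_iff _ _).mpr
            intro e he
            have hsuf := List.dropWhile_suffix (l := z₂) (fun e => !pvU e)
            exact hall e (hsuf.mem he)
          rw [if_pos (by rw [hW]; simp [pvJ])]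
          rw [if_neg (by simp [hc'])]
          rw [hwc, htw, hdw]
          rw [if_neg (by
            intro hcon
            rcases hcon with ⟨h1, _⟩
            simp at h1
            rw [h1] at hc'
            simp at hc')]
          simp [pvJ]
        · have hjne : pvJ (pvWords pvU z₂) ≠ [] := pvJ_words_ne_nil _ _ hW
          have hifneg : ¬ ((c :: z₂).head? = some '_' ∧ pvWords pvU (c :: z₂) ≠ []) := by
            intro hcon
            rcases hcon with ⟨h1, _⟩
            simp at h1
            rw [h1] at hc'
            simp at hc'
          cases hz2 : z₂ with
          | nil => rw [hz2] at hW; simp [pvWords_nil] at hW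
          | cons d z₃ =>
            subst hz2
            by_cases hdu : pvU d = true
            · have hdeq : d = '_' := by simpa [pvU] using hdu
              subst hdeq
              have hhd : ('_' :: z₃ : List Char).head? = some '_' := rfl
              rw [if_neg (by
                rw [if_pos ⟨hhd, hW⟩]
                simp)]
              have htw : ('_' :: z₃ : List Char).takeWhile (fun e => !pvU e) = [] := by
                rw [List.takeWhile_cons_of_neg (by simp [pvU])]
              have hdw : ('_' :: z₃ : List Char).dropWhile (fun e => !pvU e) = '_' :: z₃ := by
                rw [List.dropWhile_cons_of_neg (by simp [pvU])]
              rw [if_pos ⟨hhd, hW⟩]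
              rw [if_neg hifneg]
              rw [hwc, htw, hdw, pvJ_cons]
              rw [if_neg hW]
              simp
            · have hdu' : pvU d = false := by
                rcases Bool.eq_false_or_eq_true (pvU d) with h' | h'
                · exact absurd h' hdu
                · exact h'
              have hhead : ¬ ((d :: z₃ : List Char).head? = some '_' ∧ pvWords pvU (d :: z₃) ≠ []) := by
                intro hcon
                rcases hcon with ⟨h1, _⟩
                simp at h1
                rw [h1] at hdu'
                simp [pvU] at hdu'
              rw [if_neg (by
                rw [if_neg hhead]
                simpa using hjne)]
              rw [if_neg hhead]
              rw [if_neg hifneg]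
              have htwne : (d :: z₃ : List Char).takeWhile (fun e => !pvU e) ≠ [] := by
                rw [List.takeWhile_cons_of_pos (by simp [hdu'])]
                simp
              have hwz2 : pvWords pvU (d :: z₃) =
                  (d :: z₃ : List Char).takeWhile (fun e => !pvU e) ::
                    pvWords pvU ((d :: z₃ : List Char).dropWhile (fun e => !pvU e)) :=
                pvWords_take pvU (d :: z₃) htwne
              rw [hwc, hwz2, pvJ_cons, pvJ_cons]
              simp

theorem pvRstrip_squeeze (z : List Char) :
    pvRstrip (pvSqueeze z) =
      (if z.head? = some '_' ∧ pvWords pvU z ≠ [] then ['_'] else []) ++ pvJ (pvWords pvU z) :=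
  pvRstrip_squeeze_aux z.length z le_rfl

theorem dropWhile_head_false (p : Char → Bool) (l : List Char) (c : Char) (r : List Char)
    (h : List.dropWhile p l = c :: r) : p c = false := by
  induction l with
  | nil => simp at h
  | cons a l' ih =>
    by_cases ha : p a = true
    · rw [List.dropWhile_cons_of_pos ha] at h
      exact ih h
    · rw [List.dropWhile_cons_of_neg ha] at h
      injection h with h1 h2
      rw [← h1]
      simpa using ha

theorem dropWhile_eq_self_of_takeWhile_nil (p : Char → Bool) (l : List Char)
    (h : l.takeWhile p = []) : l.dropWhile p = l := by
  cases l with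
  | nil => rfl
  | cons a t =>
    by_cases ha : p a = true
    · rw [List.takeWhile_cons_of_pos ha] at h; simp at h
    · exact List.dropWhile_cons_of_neg ha

theorem stripChars_squeeze (z : List Char) :
    PySem.Chars.stripChars (pvSqueeze z) ['_'] = pvJ (pvWords pvU z) := by
  rw [stripChars_underscore, dropWhile_pvSqueeze, pvRstrip_squeeze]
  have hnu : ¬ ((z.dropWhile pvU).head? = some '_' ∧ pvWords pvU (z.dropWhile pvU) ≠ []) := by
    intro hcon
    rcases hcon with ⟨h1, _⟩
    cases hd : z.dropWhile pvU with
    | nil => rw [hd] at h1; simp at h1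
    | cons a r =>
      rw [hd] at h1
      simp at h1
      have := dropWhile_head_false pvU z a r hd
      rw [h1] at this
      simp [pvU] at this
  rw [if_neg hnu, pvWords_dropWhile]
  simp

-- ---- composition of the two splittings ----

theorem pvWords_join_ws_aux : ∀ (n : Nat) (m : List Char), m.length ≤ n →
    pvWords pvU (pvJ (pvWords PySem.Chars.isspace m)) = pvWords pvUSep m := by
  intro n
  induction n with
  | zero =>
    intro m h
    have : m = [] := by cases m <;> simp at h ⊢
    subst this
    rw [pvWords_nil, show pvJ [] = [] from rfl, pvWords_nil, pvWords_nil]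
  | succ n ih =>
    intro m h
    cases m with
    | nil =>
      rw [pvWords_nil, show pvJ [] = [] from rfl, pvWords_nil, pvWords_nil]
    | cons c m' =>
      by_cases hws : PySem.Chars.isspace c = true
      · rw [pvWords_cons_sep _ _ _ hws]
        rw [pvWords_cons_sep _ _ _ (show pvUSep c = true by simp [pvUSep, hws])]
        exact ih m' (by simp at h; omega)
      · have hws' : PySem.Chars.isspace c = false := by
          rcases Bool.eq_false_or_eq_true (PySem.Chars.isspace c) with h' | h'
          · exact absurd h' hws
          · exact h'
        by_cases hcu : (c == '_') = true
        · have hcu' : c = '_' := by simpa using hcu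
          subst hcu'
          rw [pvWords_cons_word _ _ _ hws', pvJ_cons]
          rw [pvWords_cons_sep _ _ _ (show pvUSep '_' = true by simp [pvUSep])]
          rw [show (('_' :: m'.takeWhile (fun d => !PySem.Chars.isspace d)) ++
                (if pvWords PySem.Chars.isspace (m'.dropWhile (fun d => !PySem.Chars.isspace d)) = []
                 then [] else '_' :: pvJ (pvWords PySem.Chars.isspace (m'.dropWhile (fun d => !PySem.Chars.isspace d)))))
              = '_' :: (m'.takeWhile (fun d => !PySem.Chars.isspace d) ++
                (if pvWords PySem.Chars.isspace (m'.dropWhile (fun d => !PySem.Chars.isspace d)) = []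
                 then [] else '_' :: pvJ (pvWords PySem.Chars.isspace (m'.dropWhile (fun d => !PySem.Chars.isspace d)))))
              from rfl]
          rw [pvWords_cons_sep _ _ _ (show pvU '_' = true by simp [pvU])]
          by_cases htw : m'.takeWhile (fun d => !PySem.Chars.isspace d) = []
          · rw [htw]
            have hdw : m'.dropWhile (fun d => !PySem.Chars.isspace d) = m' :=
              dropWhile_eq_self_of_takeWhile_nil _ _ htw
            rw [hdw]
            by_cases hR : pvWords PySem.Chars.isspace m' = []
            · rw [if_pos hR]
              rw [show ([] : List Char) ++ [] = [] from rfl]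
              rw [pvWords_nil]
              symm
              apply (pvWords_eq_nil_iff _ _).mpr
              intro e he
              have := (pvWords_eq_nil_iff _ _).mp hR e he
              simp [pvUSep, this]
            · rw [if_neg hR]
              rw [show ([] : List Char) ++ '_' :: pvJ (pvWords PySem.Chars.isspace m') =
                    '_' :: pvJ (pvWords PySem.Chars.isspace m') from rfl]
              rw [pvWords_cons_sep _ _ _ (show pvU '_' = true by simp [pvU])]
              exact ih m' (by simp at h; omega)
          · rw [← pvJ_cons]
            rw [← pvWords_take _ _ htw]
            exact ih m' (by simp at h; omega)
        · -- word character c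
          have hcu' : (c == '_') = false := by
            rcases Bool.eq_false_or_eq_true (c == '_') with h' | h'
            · exact absurd h' hcu
            · exact h'
          have hcs : pvUSep c = false := by simp [pvUSep, hcu', hws']
          have hcU : pvU c = false := by simp [pvU, hcu']
          rw [pvWords_cons_word _ _ _ hws', pvJ_cons]
          rw [pvWords_cons_word _ _ _ hcs]
          set twu := m'.takeWhile (fun d => !pvUSep d) with htwu
          set dwu := m'.dropWhile (fun d => !pvUSep d) with hdwu
          have hm'split : twu ++ dwu = m' := List.takeWhile_append_dropWhile
          have htwuprops : ∀ x ∈ twu, pvUSep x = false := by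
            intro x hx
            have := List.mem_takeWhile_imp hx
            simpa using this
          have htwuws : ∀ x ∈ twu, (fun d => !PySem.Chars.isspace d) x = true := by
            intro x hx
            have := htwuprops x hx
            simp [pvUSep] at this
            simp [this.2]
          have htwuU : ∀ x ∈ twu, (fun d => !pvU d) x = true := by
            intro x hx
            have := htwuprops x hx
            simp [pvUSep] at this
            simp [pvU, this.1]
          have htww : m'.takeWhile (fun d => !PySem.Chars.isspace d) =
              twu ++ dwu.takeWhile (fun d => !PySem.Chars.isspace d) := by
            conv_lhs => rw [← hm'split]
            exact List.takeWhile_append_of_pos htwuws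
          have hdww : m'.dropWhile (fun d => !PySem.Chars.isspace d) =
              dwu.dropWhile (fun d => !PySem.Chars.isspace d) := by
            conv_lhs => rw [← hm'split]
            exact List.dropWhile_append_of_pos htwuws
          have hlen : dwu.length ≤ n := by
            have := (List.dropWhile_suffix (l := m') (fun d => !pvUSep d)).length_le
            rw [← hdwu] at this
            simp at h
            omega
          cases hdwue : dwu with
          | nil =>
            rw [htww, hdww, hdwue]
            simp only [List.append_nil, List.takeWhile_nil, List.dropWhile_nil]
            rw [pvWords_nil]
            rw [show (c :: twu) ++ (if ([] : List (List Char)) = [] then [] else '_' :: pvJ []) =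
                  c :: (twu ++ []) from by simp]
            rw [pvWords_cons_word _ _ _ hcU]
            rw [List.append_nil]
            rw [List.takeWhile_eq_self_iff.mpr htwuU]
            rw [List.dropWhile_eq_nil_iff.mpr htwuU]
            rw [pvWords_nil, pvWords_nil]
          | cons e rest =>
            rw [← hdwue]
            have hes : pvUSep e = true := by
              have := dropWhile_head_false (fun d => !pvUSep d) m' e rest (by rw [← hdwu, hdwue])
              simpa using this
            by_cases hews : PySem.Chars.isspace e = true
            · have htkdwu : dwu.takeWhile (fun d => !PySem.Chars.isspace d) = [] := by
                rw [hdwue, List.takeWhile_cons_of_neg (by simp [hews])]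
              have hdwdwu : dwu.dropWhile (fun d => !PySem.Chars.isspace d) = dwu := by
                rw [hdwue, List.dropWhile_cons_of_neg (by simp [hews]), ← hdwue]
              rw [htww, hdww, htkdwu, hdwdwu, List.append_nil]
              by_cases hR : pvWords PySem.Chars.isspace dwu = []
              · rw [if_pos hR]
                rw [show (c :: twu) ++ ([] : List Char) = c :: (twu ++ []) from by simp]
                rw [pvWords_cons_word _ _ _ hcU]
                rw [List.append_nil]
                rw [List.takeWhile_eq_self_iff.mpr htwuU]
                rw [List.dropWhile_eq_nil_iff.mpr htwuU]
                rw [pvWords_nil]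
                rw [show pvWords pvUSep dwu = [] from (pvWords_eq_nil_iff _ _).mpr (by
                  intro x hx
                  have := (pvWords_eq_nil_iff _ _).mp hR x hx
                  simp [pvUSep, this])]
              · rw [if_neg hR]
                rw [show (c :: twu) ++ '_' :: pvJ (pvWords PySem.Chars.isspace dwu) =
                      c :: (twu ++ '_' :: pvJ (pvWords PySem.Chars.isspace dwu)) from rfl]
                rw [pvWords_cons_word _ _ _ hcU]
                rw [List.takeWhile_append_of_pos htwuU]
                rw [List.takeWhile_cons_of_neg (by simp [pvU])]
                rw [List.dropWhile_append_of_pos htwuU]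
                rw [List.dropWhile_cons_of_neg (by simp [pvU])]
                rw [pvWords_cons_sep _ _ _ (show pvU '_' = true by simp [pvU])]
                rw [ih dwu hlen]
                simp
            · have hews' : PySem.Chars.isspace e = false := by
                rcases Bool.eq_false_or_eq_true (PySem.Chars.isspace e) with h' | h'
                · exact absurd h' hews
                · exact h'
              have heU : pvU e = true := by
                simp [pvUSep, hews'] at hes
                simp [pvU, hes]
              have htkdwu : dwu.takeWhile (fun d => !PySem.Chars.isspace d) =
                  e :: rest.takeWhile (fun d => !PySem.Chars.isspace d) := by
                rw [hdwue, List.takeWhile_cons_of_pos (by simp [hews'])]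
              have hwdwu : pvWords PySem.Chars.isspace dwu =
                  (e :: rest.takeWhile (fun d => !PySem.Chars.isspace d)) ::
                    pvWords PySem.Chars.isspace (rest.dropWhile (fun d => !PySem.Chars.isspace d)) := by
                rw [hdwue]
                exact pvWords_cons_word _ _ _ hews'
              have hdwdwu : dwu.dropWhile (fun d => !PySem.Chars.isspace d) =
                  rest.dropWhile (fun d => !PySem.Chars.isspace d) := by
                rw [hdwue, List.dropWhile_cons_of_pos (by simp [hews'])]
              rw [htww, hdww, htkdwu, hdwdwu]
              rw [show ((c :: (twu ++ e :: rest.takeWhile (fun d => !PySem.Chars.isspace d))) ++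
                    (if pvWords PySem.Chars.isspace (rest.dropWhile (fun d => !PySem.Chars.isspace d)) = []
                     then [] else '_' :: pvJ (pvWords PySem.Chars.isspace (rest.dropWhile (fun d => !PySem.Chars.isspace d)))))
                  = c :: (twu ++ e :: (rest.takeWhile (fun d => !PySem.Chars.isspace d) ++
                    (if pvWords PySem.Chars.isspace (rest.dropWhile (fun d => !PySem.Chars.isspace d)) = []
                     then [] else '_' :: pvJ (pvWords PySem.Chars.isspace (rest.dropWhile (fun d => !PySem.Chars.isspace d))))))
                  from by simp]
              rw [pvWords_cons_word _ _ _ hcU]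
              rw [List.takeWhile_append_of_pos htwuU]
              rw [List.takeWhile_cons_of_neg (by simp [heU])]
              rw [List.append_nil]
              rw [List.dropWhile_append_of_pos htwuU]
              rw [List.dropWhile_cons_of_neg (by simp [heU])]
              congr 1
              rw [← ih dwu hlen, hwdwu, pvJ_cons, List.cons_append]

theorem pvWords_join_ws (m : List Char) :
    pvWords pvU (pvJ (pvWords PySem.Chars.isspace m)) = pvWords pvUSep m :=
  pvWords_join_ws_aux m.length m le_rfl

theorem pvUSep_pvMapc (c : Char) : pvUSep (pvMapc c) = pvSep c := by
  unfold pvUSep pvSep pvMapc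
  cases h1 : (c == '/') <;> cases h2 : (c == '-') <;> simp [h1, h2]

theorem pvMapc_of_not_sep (c : Char) (h : pvSep c = false) : pvMapc c = c := by
  unfold pvMapc
  rw [if_neg]
  intro hh
  unfold pvSep at h
  simp at h hh
  rcases hh with h1 | h1 <;> simp [h1] at h

theorem pvWords_map_aux : ∀ (n : Nat) (l : List Char), l.length ≤ n →
    pvWords pvUSep (l.map pvMapc) = pvWords pvSep l := by
  intro n
  induction n with
  | zero =>
    intro l h
    have : l = [] := by cases l <;> simp at h ⊢
    subst this
    rw [List.map_nil, pvWords_nil, pvWords_nil]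
  | succ n ih =>
    intro l h
    cases l with
    | nil => rw [List.map_nil, pvWords_nil, pvWords_nil]
    | cons c cs =>
      rw [List.map_cons]
      by_cases hc : pvSep c = true
      · rw [pvWords_cons_sep _ _ _ (by rw [pvUSep_pvMapc]; exact hc)]
        rw [pvWords_cons_sep _ _ _ hc]
        exact ih cs (by simp at h; omega)
      · have hc' : pvSep c = false := by
          rcases Bool.eq_false_or_eq_true (pvSep c) with h' | h'
          · exact absurd h' hc
          · exact h'
        rw [pvWords_cons_word _ _ _ (by rw [pvUSep_pvMapc]; exact hc')]
        rw [pvWords_cons_word _ _ _ hc']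
        have htk : List.takeWhile (fun d => !pvUSep d) (cs.map pvMapc) =
            List.takeWhile (fun d => !pvSep d) cs := by
          rw [List.takeWhile_map]
          have : ((fun d => !pvUSep d) ∘ pvMapc) = (fun d => !pvSep d) := by
            funext d; simp [Function.comp, pvUSep_pvMapc]
          rw [this]
          rw [List.map_congr_left (g := id) (fun x hx =>
            pvMapc_of_not_sep x (by
              have := List.mem_takeWhile_imp hx
              simpa using this))]
          rw [List.map_id]
        have hdw : List.dropWhile (fun d => !pvUSep d) (cs.map pvMapc) =
            (List.dropWhile (fun d => !pvSep d) cs).map pvMapc := by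
          rw [List.dropWhile_map]
          have : ((fun d => !pvUSep d) ∘ pvMapc) = (fun d => !pvSep d) := by
            funext d; simp [Function.comp, pvUSep_pvMapc]
          rw [this]
        rw [htk, hdw, pvMapc_of_not_sep c hc']
        rw [ih (List.dropWhile (fun d => !pvSep d) cs) (by
          have := List.length_dropWhile_le (fun d => !pvSep d) cs
          simp at h; omega)]

theorem pvWords_map (l : List Char) :
    pvWords pvUSep (l.map pvMapc) = pvWords pvSep l :=
  pvWords_map_aux l.length l le_rfl

-- ---- B's fold ----

theorem pvHeadSep_cons (c : Char) (cs : List Char) : pvHeadSep (c :: cs) = pvSep c := rfl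

theorem bfold_eq (cs : List Char) :
    ∀ (out : List Char) (pending : Bool),
      (cs.foldl pvBStep (out, pending)).1 =
      out ++
        (if out ≠ [] ∧ pvWords pvSep cs ≠ [] ∧ (pending = true ∨ pvHeadSep cs = true)
         then ['_'] else []) ++ pvJ (pvWords pvSep cs) := by
  induction cs with
  | nil =>
    intro out pending
    rw [List.foldl_nil, pvWords_nil]
    simp [pvJ]
  | cons c cs ih =>
    intro out pending
    rw [List.foldl_cons]
    by_cases hsep : pvSep c = true
    · have hstep : pvBStep (out, pending) c = (out, true) := by
        unfold pvBStep
        rw [if_pos (show (c == '/' || c == '-' || c == '_' || PySem.Chars.isspace c) = true from hsep)]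
      rw [hstep, ih out true]
      rw [pvWords_cons_sep _ _ _ hsep]
      by_cases ho : out = [] <;> by_cases hW : pvWords pvSep cs = [] <;>
        simp [pvHeadSep_cons, hsep, ho, hW]
    · have hsep' : pvSep c = false := by
        rcases Bool.eq_false_or_eq_true (pvSep c) with h' | h'
        · exact absurd h' hsep
        · exact h'
      have hstep : pvBStep (out, pending) c =
          ((if pending && !out.isEmpty then out ++ ['_'] else out) ++ [c], false) := by
        unfold pvBStep
        rw [if_neg (by
          rw [show (c == '/' || c == '-' || c == '_' || PySem.Chars.isspace c) = false from hsep']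
          simp)]
      rw [hstep, ih _ false]
      rw [pvWords_cons_word _ _ _ hsep']
      by_cases htw : cs.takeWhile (fun d => !pvSep d) = []
      · have hdw : cs.dropWhile (fun d => !pvSep d) = cs :=
          dropWhile_eq_self_of_takeWhile_nil _ _ htw
        rw [htw, hdw]
        by_cases hW : pvWords pvSep cs = []
        · rw [hW]
          by_cases ho : out = [] <;> by_cases hp : pending = true <;>
            simp [pvJ, pvHeadSep_cons, hsep', ho, hp]
        · have hhs : pvHeadSep cs = true := by
            cases hcs : cs with
            | nil => rw [hcs] at hW; simp [pvWords_nil] at hW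
            | cons d cs' =>
              rw [hcs] at htw
              by_cases hd : pvSep d = true
              · simp [pvHeadSep, hd]
              · rw [List.takeWhile_cons_of_pos (by simp [hd])] at htw
                simp at htw
          by_cases ho : out = [] <;> by_cases hp : pending = true <;>
            simp [pvJ_cons, hW, hhs, pvHeadSep_cons, hsep', ho, hp]
      · have hw := pvWords_take pvSep cs htw
        have hhs : pvHeadSep cs = false := by
          cases hcs : cs with
          | nil => simp [pvHeadSep]
          | cons d cs' =>
            rw [hcs] at htw
            by_cases hd : pvSep d = true
            · rw [List.takeWhile_cons_of_neg (by simp [hd])] at htw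
              simp at htw
            · have hd' : pvSep d = false := by
                rcases Bool.eq_false_or_eq_true (pvSep d) with h' | h'
                · exact absurd h' hd
                · exact h'
              simp [pvHeadSep, hd']
        rw [hw]
        by_cases ho : out = [] <;> by_cases hp : pending = true <;>
          by_cases hW' : pvWords pvSep (cs.dropWhile (fun d => !pvSep d)) = [] <;>
          simp [pvJ_cons, hhs, pvHeadSep_cons, hsep', ho, hp, hW']

-- ---- the stripped token starts with a non-space character ----

theorem strip_head_not_space (s : List Char) (h : PySem.Chars.strip s ≠ []) :
    ∃ c cs, PySem.Chars.strip s = c :: cs ∧ PySem.Chars.isspace c = false := by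
  unfold PySem.Chars.strip PySem.Chars.rstrip PySem.Chars.lstrip at *
  set L := List.dropWhile PySem.Chars.isspace s with hL
  have hpre : (List.dropWhile PySem.Chars.isspace L.reverse).reverse <+: L := by
    have := List.dropWhile_suffix (l := L.reverse) PySem.Chars.isspace
    have h2 := List.reverse_prefix.mpr this
    rw [List.reverse_reverse] at h2
    exact h2
  cases hc : (List.dropWhile PySem.Chars.isspace L.reverse).reverse with
  | nil => exact absurd hc h
  | cons c cs =>
    refine ⟨c, cs, rfl, ?_⟩
    rw [hc] at hpre
    rcases hpre with ⟨t, ht⟩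
    have hL2 : L = c :: (cs ++ t) := ht.symm
    exact dropWhile_head_false PySem.Chars.isspace s c (cs ++ t) (by rw [← hL, hL2])

theorem isspace_upperChar (c : Char) (h : PySem.Chars.isspace c = false) :
    PySem.Chars.isspace (PySem.Chars.upperChar c) = false := by
  unfold PySem.Chars.upperChar
  by_cases hl : PySem.Chars.islower c = true
  · rw [if_pos hl]
    unfold PySem.Chars.islower at hl
    simp at hl
    have h1 : 97 ≤ c.toNat := by rw [Char.le_def] at hl; exact hl.1
    have h2 : c.toNat ≤ 122 := by rw [Char.le_def] at hl; exact hl.2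
    have hv : (Char.ofNat (c.toNat - 32)).toNat = c.toNat - 32 := by
      rw [Char.toNat_ofNat, if_pos (by left; omega : (c.toNat - 32).isValidChar)]
    unfold PySem.Chars.isspace
    simp only [hv]
    simp
    omega
  · rw [if_neg hl]
    exact h

theorem intercalate_eq_pvJ (L : List (List Char)) :
    List.intercalate ['_'] L = pvJ L := by
  induction L with
  | nil => simp [List.intercalate, pvJ]
  | cons w ws ih =>
    cases ws with
    | nil => simp [List.intercalate, pvJ]
    | cons x xs =>
      rw [show List.intercalate ['_'] (w :: x :: xs) =
            w ++ ['_'] ++ List.intercalate ['_'] (x :: xs) from by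
          simp [List.intercalate, List.intersperse]]
      rw [ih, pvJ_cons w (x :: xs)]
      simp

theorem pvMapc_head_not_space (x : Char) (hx : PySem.Chars.isspace x = false) :
    PySem.Chars.isspace (pvMapc x) = false := by
  unfold pvMapc
  split
  · decide
  · exact hx

-- ===== VERDICT (by name: the statement is the Claim_ definition above) =====
theorem normalize_fx_pair_spec : Claim_equal_normalize_fx_pair := by
  intro pair hdom hpre
  unfold Spec_normalize_fx_pair
  have hslist : (PySem.Str.strip pair).toList = PySem.Chars.strip pair.toList :=
    PySem.Str.toList_strip pair
  have hsne : PySem.Chars.strip pair.toList ≠ [] := by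
    intro h0
    apply hpre
    have h1 : PySem.Str.strip pair = String.ofList (PySem.Chars.strip pair.toList) := rfl
    rw [h1, h0]
  obtain ⟨c0, cs0, hsc, hc0⟩ := strip_head_not_space pair.toList hsne
  have htlist : (PySem.Str.upper (PySem.Str.strip pair)).toList =
      PySem.Chars.upperChar c0 :: List.map PySem.Chars.upperChar cs0 := by
    have h1 : PySem.Str.upper (PySem.Str.strip pair) =
        String.ofList (PySem.Chars.upper (PySem.Str.strip pair).toList) := rfl
    rw [h1, String.toList_ofList, hslist, hsc]
    rfl
  set t := (PySem.Str.upper (PySem.Str.strip pair)).toList with ht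
  have hheadws : PySem.Chars.isspace (PySem.Chars.upperChar c0) = false :=
    isspace_upperChar c0 hc0
  -- A side: the two replaces are the map pvMapc
  have hm : (PySem.Str.replace (PySem.Str.replace (PySem.Str.upper (PySem.Str.strip pair)) "/" "_") "-" "_").toList
      = t.map pvMapc := by
    rw [PySem.Str.toList_replace, PySem.Str.toList_replace]
    rw [show ("/" : String).toList = ['/'] from by decide]
    rw [show ("-" : String).toList = ['-'] from by decide]
    rw [show ("_" : String).toList = ['_'] from by decide]
    rw [replace_single, replace_single, List.map_map]
    apply List.map_congr_left
    intro x _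
    by_cases h1 : (x == '/') = true
    · have : x = '/' := by simpa using h1
      subst this
      simp [pvMapc]
    · by_cases h2 : (x == '-') = true
      · have : x = '-' := by simpa using h2
        subst this
        simp [pvMapc]
      · simp [pvMapc, Function.comp, h1, h2]
  have hmhead : pvWords PySem.Chars.isspace (t.map pvMapc) ≠ [] := by
    rw [show t.map pvMapc = pvMapc (PySem.Chars.upperChar c0) ::
          (List.map PySem.Chars.upperChar cs0).map pvMapc from by rw [htlist]; rfl]
    rw [pvWords_cons_word _ _ _ (pvMapc_head_not_space _ hheadws)]
    simp
  -- parts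
  have hparts : (PySem.Str.split₀ (PySem.Str.replace (PySem.Str.replace (PySem.Str.upper (PySem.Str.strip pair)) "/" "_") "-" "_")).filter
        (fun chunk => !chunk.toList.isEmpty)
      = List.map String.ofList (pvWords PySem.Chars.isspace (t.map pvMapc)) := by
    have h1 : PySem.Str.split₀ (PySem.Str.replace (PySem.Str.replace (PySem.Str.upper (PySem.Str.strip pair)) "/" "_") "-" "_")
        = List.map String.ofList (PySem.Chars.split₀ (PySem.Str.replace (PySem.Str.replace (PySem.Str.upper (PySem.Str.strip pair)) "/" "_") "-" "_").toList) := rfl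
    rw [h1, hm, split0_eq]
    apply List.filter_eq_self.mpr
    intro a ha
    rcases List.mem_map.mp ha with ⟨w, hw, rfl⟩
    rw [String.toList_ofList]
    simpa using pvWords_ne_nil _ _ _ hw
  have hA : normalize_fx_pair pair = String.ofList (pvJ (pvWords pvSep t)) := by
    unfold normalize_fx_pair
    dsimp only
    rw [hparts]
    rw [if_pos (by
      rw [show (!(List.map String.ofList (pvWords PySem.Chars.isspace (t.map pvMapc))).isEmpty) = true from by
        simp [hmhead]])]
    have htok2 : (PySem.Str.join "_" (List.map String.ofList (pvWords PySem.Chars.isspace (t.map pvMapc)))).toList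
        = pvJ (pvWords PySem.Chars.isspace (t.map pvMapc)) := by
      rw [PySem.Str.toList_join]
      rw [show ("_" : String).toList = ['_'] from by decide]
      rw [List.map_map]
      rw [show List.map (String.toList ∘ String.ofList) (pvWords PySem.Chars.isspace (List.map pvMapc t))
            = pvWords PySem.Chars.isspace (List.map pvMapc t) from by
          rw [List.map_congr_left (g := id) (fun w _ => by simp [Function.comp]), List.map_id]]
      exact intercalate_eq_pvJ _
    rw [pvCollapseA_eq _ _ le_rfl, htok2]
    have hfin : PySem.Str.stripChars (String.ofList (pvSqueeze (pvJ (pvWords PySem.Chars.isspace (t.map pvMapc))))) "_"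
        = String.ofList (PySem.Chars.stripChars (pvSqueeze (pvJ (pvWords PySem.Chars.isspace (t.map pvMapc)))) ['_']) := by
      have h2 : ∀ (u : String), PySem.Str.stripChars u "_" =
          String.ofList (PySem.Chars.stripChars u.toList ("_" : String).toList) := fun u => rfl
      rw [h2, String.toList_ofList]
      rw [show ("_" : String).toList = ['_'] from by decide]
    rw [hfin, stripChars_squeeze, pvWords_join_ws, pvWords_map]
  have hB : normalize_fx_pair_alt pair = String.ofList (pvJ (pvWords pvSep t)) := by
    unfold normalize_fx_pair_alt
    dsimp only
    rw [← ht, bfold_eq t [] false]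
    simp
  rw [hA, hB]
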